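-- pv_equiv track=rewrite | github.com/smoalem/Regulatory-Enforcement-Water-Data-Challenge-2022 | A8_potential_mech_downage_and_method_review_generator.py | review_append
-- ===== SOURCE A (Python) =====
-- def review_append(dict_review, review_list_of_list):
--     for rev in review_list_of_list:
--         dict_review['fac_id'].append(rev[0])
--         dict_review['method'].append(rev[1])
--         dict_review['initial_date'].append(rev[2])
--         dict_review['final_date'].append(rev[3])
--         dict_review['middle_date'].append(rev[4])
--         dict_review['color'].append(rev[5])
--         dict_review['adj_overage'].append(rev[6])
--     return dict_review
-- ===== SOURCE B (Python) =====
-- def review_append(dict_review, review_list_of_list):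
--     keys = ['fac_id', 'method', 'initial_date', 'final_date',
--             'middle_date', 'color', 'adj_overage']
--     for key, column in zip(keys, zip(*review_list_of_list)):
--         dict_review[key].extend(column)
--     return dict_review
-- ===== Notes on version B (the rewrite author's own statement) =====
-- stated objective: idiomatic
-- what changed: B transposes the rows with zip(*review_list_of_list) and walks the data column-major, extending each named list once with its whole column, instead of A's row-major loop of seven per-row appends; Pre_ excludes inputs on which A raises (a nonempty row list with one of the seven keys missing, or with a row shorter than 7 fields) and association lists with duplicate keys, which do not represent a Python dict.
import Mathlib
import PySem

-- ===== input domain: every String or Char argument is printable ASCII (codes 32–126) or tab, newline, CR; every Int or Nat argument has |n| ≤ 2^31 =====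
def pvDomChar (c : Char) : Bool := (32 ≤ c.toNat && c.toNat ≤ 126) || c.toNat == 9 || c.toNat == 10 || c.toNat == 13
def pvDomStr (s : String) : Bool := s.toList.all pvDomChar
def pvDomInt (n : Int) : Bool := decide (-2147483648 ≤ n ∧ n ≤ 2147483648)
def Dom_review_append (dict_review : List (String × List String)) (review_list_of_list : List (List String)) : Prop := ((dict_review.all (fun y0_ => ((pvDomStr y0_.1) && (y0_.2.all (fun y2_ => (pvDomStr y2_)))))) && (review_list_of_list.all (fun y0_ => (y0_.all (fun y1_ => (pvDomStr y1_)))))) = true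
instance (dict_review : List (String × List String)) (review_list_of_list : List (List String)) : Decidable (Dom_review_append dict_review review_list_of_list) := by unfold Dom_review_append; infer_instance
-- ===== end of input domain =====

-- B transposes the rows with zip(*) and walks the data column-major (one extend per key) instead of
-- A's row-major seven-appends-per-row loop; equivalence is about the RETURN value (both Pythons
-- mutate dict_review in place).

-- ===== PORT A =====
-- dict_review[k].append(v): append to the list of the first entry with key k (no-op on a missing
-- key; inputs where Python would raise KeyError are outside Pre_).
def appendAt (d : List (String × List String)) (k : String) (v : String) : List (String × List String) :=
  match d with
  | [] => []
  | (k', vs) :: rest => if k' = k then (k', vs ++ [v]) :: rest else (k', vs) :: appendAt rest k v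

-- rev[i] is PySem.List.pyGet?; .getD "" is only reached where Python raises IndexError (outside Pre_).
def review_append (dict_review : List (String × List String)) (review_list_of_list : List (List String)) : List (String × List String) :=
  review_list_of_list.foldl (fun d rev =>
    appendAt (appendAt (appendAt (appendAt (appendAt (appendAt (appendAt d
      "fac_id" ((PySem.List.pyGet? rev 0).getD ""))
      "method" ((PySem.List.pyGet? rev 1).getD ""))
      "initial_date" ((PySem.List.pyGet? rev 2).getD ""))
      "final_date" ((PySem.List.pyGet? rev 3).getD ""))
      "middle_date" ((PySem.List.pyGet? rev 4).getD ""))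
      "color" ((PySem.List.pyGet? rev 5).getD ""))
      "adj_overage" ((PySem.List.pyGet? rev 6).getD "")) dict_review

-- ===== PORT B =====
def keys7 : List String := ["fac_id", "method", "initial_date", "final_date", "middle_date", "color", "adj_overage"]

-- dict_review[k].extend(vs): extend the list of the first entry with key k (no-op on a missing key,
-- outside Pre_).
def extendAt (d : List (String × List String)) (k : String) (vs : List String) : List (String × List String) :=
  match d with
  | [] => []
  | (k', ws) :: rest => if k' = k then (k', ws ++ vs) :: rest else (k', ws) :: extendAt rest k vs

-- termination helpers for the hand port of zip(*rows)
theorem sumLen_tail_le (t : List (List String)) :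
    ((t.map List.tail).map List.length).sum ≤ (t.map List.length).sum := by
  induction t with
  | nil => simp
  | cons r rs ih =>
      simp only [List.map_cons, List.sum_cons]
      have : r.tail.length ≤ r.length := by cases r <;> simp
      omega

theorem sumLen_tail_lt (t : List (List String)) (h1 : t ≠ [])
    (h2 : ∀ r ∈ t, r ≠ []) :
    ((t.map List.tail).map List.length).sum < (t.map List.length).sum := by
  cases t with
  | nil => exact absurd rfl h1
  | cons r rs =>
      have hr : r ≠ [] := h2 r (by simp)
      have hlt : r.tail.length < r.length := by
        cases r with | nil => exact absurd rfl hr | cons a l => simp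
      have hle := sumLen_tail_le rs
      simp only [List.map_cons, List.sum_cons]
      omega

-- hand port of Python's zip(*rows): stop as soon as some row is exhausted, else emit the heads
-- and recurse on the tails; exact for any list of lists of strings (zip() of no iterables is []).
def pyZipStar (t : List (List String)) : List (List String) :=
  if h : t = [] ∨ ∃ r ∈ t, r = [] then []
  else (t.map (fun r => r.headD "")) :: pyZipStar (t.map List.tail)
termination_by (t.map List.length).sum
decreasing_by
  simp only [List.map_subtype, List.unattach_attach]
  exact sumLen_tail_lt t (fun he => h (Or.inl he)) (fun r hr he => h (Or.inr ⟨r, hr, he⟩))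

def review_append_alt (dict_review : List (String × List String)) (review_list_of_list : List (List String)) : List (String × List String) :=
  (keys7.zip (pyZipStar review_list_of_list)).foldl (fun d kc => extendAt d kc.1 kc.2) dict_review

-- ===== PRECONDITION & SPEC =====
-- Pre_ excludes (i) inputs on which Python A raises: a nonempty row list with one of the seven keys
-- missing (KeyError) or some row shorter than 7 (IndexError); and (ii) association lists with
-- duplicate keys, which do not represent a Python dict.  Nothing is required when the row list is
-- empty and A returns dict_review untouched.
def Pre_review_append (dict_review : List (String × List String)) (review_list_of_list : List (List String)) : Prop :=
  review_list_of_list = [] ∨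
    ((dict_review.map Prod.fst).Nodup ∧
     (∀ k ∈ keys7, k ∈ dict_review.map Prod.fst) ∧
     (∀ r ∈ review_list_of_list, 7 ≤ r.length))
instance (dict_review : List (String × List String)) (review_list_of_list : List (List String)) : Decidable (Pre_review_append dict_review review_list_of_list) := by unfold Pre_review_append; infer_instance

def pvWitness_review_append : (List (String × List String)) × List (List String) :=
  ([("fac_id", []), ("method", []), ("initial_date", []), ("final_date", []),
    ("middle_date", []), ("color", ["old"]), ("adj_overage", [])],
   [["F1", "m", "2021-01-01", "2021-02-01", "2021-01-15", "red", "3"]])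

def Spec_review_append (dict_review : List (String × List String)) (review_list_of_list : List (List String)) (out : List (String × List String)) : Prop := out = review_append_alt dict_review review_list_of_list
instance (dict_review : List (String × List String)) (review_list_of_list : List (List String)) (out : List (String × List String)) : Decidable (Spec_review_append dict_review review_list_of_list out) := by unfold Spec_review_append; infer_instance

-- ===== CLAIM (what is proved, stated in full; the proofs are below) =====
def Claim_equal_review_append : Prop := ∀ (dict_review : List (String × List String)) (review_list_of_list : List (List String)), Dom_review_append dict_review review_list_of_list → Pre_review_append dict_review review_list_of_list → Spec_review_append dict_review review_list_of_list (review_append dict_review review_list_of_list)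

-- ===== LEMMAS AND PROOFS =====

-- the (key, column) pairs B extends with, and the per-row singleton version A appends with
def pairsCols (rows : List (List String)) : List (String × List String) :=
  [("fac_id", rows.map (fun r => (PySem.List.pyGet? r 0).getD "")),
   ("method", rows.map (fun r => (PySem.List.pyGet? r 1).getD "")),
   ("initial_date", rows.map (fun r => (PySem.List.pyGet? r 2).getD "")),
   ("final_date", rows.map (fun r => (PySem.List.pyGet? r 3).getD "")),
   ("middle_date", rows.map (fun r => (PySem.List.pyGet? r 4).getD "")),
   ("color", rows.map (fun r => (PySem.List.pyGet? r 5).getD "")),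
   ("adj_overage", rows.map (fun r => (PySem.List.pyGet? r 6).getD ""))]

def pairsRow (r : List String) : List (String × List String) :=
  [("fac_id", [(PySem.List.pyGet? r 0).getD ""]), ("method", [(PySem.List.pyGet? r 1).getD ""]),
   ("initial_date", [(PySem.List.pyGet? r 2).getD ""]), ("final_date", [(PySem.List.pyGet? r 3).getD ""]),
   ("middle_date", [(PySem.List.pyGet? r 4).getD ""]), ("color", [(PySem.List.pyGet? r 5).getD ""]),
   ("adj_overage", [(PySem.List.pyGet? r 6).getD ""])]

-- everything an extend-loop over ps adds to the entry with key k
def contrib (ps : List (String × List String)) (k : String) : List String :=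
  match ps with
  | [] => []
  | kc :: ps => (if k = kc.1 then kc.2 else []) ++ contrib ps k

-- the pointwise effect of a whole extend-loop on one dict entry
def multiExtend (ps : List (String × List String)) (p : String × List String) : String × List String :=
  (p.1, p.2 ++ contrib ps p.1)

def upd (k : String) (vs : List String) (p : String × List String) : String × List String :=
  if p.1 = k then (p.1, p.2 ++ vs) else p

theorem appendAt_eq_extendAt (d : List (String × List String)) (k : String) (v : String) :
    appendAt d k v = extendAt d k [v] := by
  induction d with
  | nil => rfl
  | cons p rest ih =>
      obtain ⟨k', ws⟩ := p
      by_cases h : k' = k <;> simp [appendAt, extendAt, h, ih]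

theorem extendAt_eq_map (d : List (String × List String)) (k : String) (vs : List String)
    (h : (d.map Prod.fst).Nodup) : extendAt d k vs = d.map (upd k vs) := by
  induction d with
  | nil => rfl
  | cons p rest ih =>
      obtain ⟨k', ws⟩ := p
      simp only [List.map_cons, List.nodup_cons] at h
      by_cases hk : k' = k
      · subst hk
        have hrest : rest.map (upd k' vs) = rest := by
          rw [List.map_congr_left (g := id) (fun q hq => by
            have : q.1 ≠ k' := fun he => h.1 (he ▸ List.mem_map_of_mem hq)
            simp [upd, this]), List.map_id]
        simp [extendAt, upd, hrest]
      · simp [extendAt, upd, hk, ih h.2]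

-- a whole extend-loop over a duplicate-free dict is one map
theorem foldl_extendAt_eq_map (ps : List (String × List String)) :
    ∀ (d : List (String × List String)), (d.map Prod.fst).Nodup →
      ps.foldl (fun d kc => extendAt d kc.1 kc.2) d = d.map (multiExtend ps) := by
  induction ps with
  | nil =>
      intro d _
      rw [List.foldl_nil,
          List.map_congr_left (g := id) (fun p _ => by simp [multiExtend, contrib]), List.map_id]
  | cons kc ps ih =>
      intro d h
      rw [List.foldl_cons, extendAt_eq_map d kc.1 kc.2 h,
          ih _ (by rw [List.map_map]; simpa [Function.comp_def, upd, apply_ite] using h),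
          List.map_map]
      apply List.map_congr_left
      intro p _
      by_cases hk : p.1 = kc.1 <;>
        simp [upd, multiExtend, contrib, hk]

theorem multiExtend_pairsCols_nil (p : String × List String) :
    multiExtend (pairsCols []) p = p := by
  obtain ⟨k, vs⟩ := p
  simp only [multiExtend, pairsCols, List.map_nil, contrib]
  split_ifs <;> simp

set_option maxHeartbeats 1000000 in
theorem multiExtend_step (r : List String) (rs : List (List String)) (p : String × List String) :
    multiExtend (pairsCols rs) (multiExtend (pairsRow r) p) = multiExtend (pairsCols (r :: rs)) p := by
  obtain ⟨k, vs⟩ := p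
  simp only [multiExtend, pairsRow, pairsCols, List.map_cons, contrib]
  split_ifs <;> simp_all

-- canonical form of A's result
theorem A_canon (rows : List (List String)) (d : List (String × List String))
    (h : (d.map Prod.fst).Nodup) :
    review_append d rows = d.map (multiExtend (pairsCols rows)) := by
  induction rows generalizing d with
  | nil =>
      rw [List.map_congr_left (g := id) (fun p _ => multiExtend_pairsCols_nil p), List.map_id]
      simp [review_append]
  | cons r rs ih =>
      show List.foldl _ _ (r :: rs) = _
      rw [List.foldl_cons]
      have hstep : appendAt (appendAt (appendAt (appendAt (appendAt (appendAt (appendAt d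
          "fac_id" ((PySem.List.pyGet? r 0).getD ""))
          "method" ((PySem.List.pyGet? r 1).getD ""))
          "initial_date" ((PySem.List.pyGet? r 2).getD ""))
          "final_date" ((PySem.List.pyGet? r 3).getD ""))
          "middle_date" ((PySem.List.pyGet? r 4).getD ""))
          "color" ((PySem.List.pyGet? r 5).getD ""))
          "adj_overage" ((PySem.List.pyGet? r 6).getD "") = d.map (multiExtend (pairsRow r)) := by
        have h2 := foldl_extendAt_eq_map (pairsRow r) d h
        simp only [pairsRow, List.foldl_cons, List.foldl_nil] at h2
        simp only [appendAt_eq_extendAt]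
        exact h2
      have hkeys : (d.map (multiExtend (pairsRow r))).map Prod.fst = d.map Prod.fst := by
        simp [List.map_map, Function.comp_def, multiExtend]
      rw [hstep]
      show review_append _ rs = _
      rw [ih _ (by rw [hkeys]; exact h), List.map_map]
      exact List.map_congr_left (fun p _ => multiExtend_step r rs p)

theorem pyZipStar_nil : pyZipStar [] = [] := by
  rw [pyZipStar.eq_def, dif_pos (Or.inl rfl)]

theorem pyZipStar_step (rows : List (List String)) (h1 : rows ≠ [])
    (h2 : ∀ r ∈ rows, r ≠ []) :
    pyZipStar rows = rows.map (fun r => r.headD "") :: pyZipStar (rows.map List.tail) := by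
  rw [pyZipStar.eq_def, dif_neg]
  rintro (he | ⟨r, hr, he⟩)
  · exact h1 he
  · exact h2 r hr he

-- the structural shape of zip(keys, zip(*rows)) when every row is long enough
def zipCols : List String → List (List String) → List (String × List String)
  | [], _ => []
  | k :: ks, rows => (k, rows.map (fun r => r.headD "")) :: zipCols ks (rows.map List.tail)

theorem zip_pyZipStar (ks : List String) : ∀ (rows : List (List String)), rows ≠ [] →
    (∀ r ∈ rows, ks.length ≤ r.length) →
    ks.zip (pyZipStar rows) = zipCols ks rows := by
  induction ks with
  | nil => intro rows _ _; simp [zipCols]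
  | cons k ks ih =>
      intro rows h1 h2
      have hne : ∀ r ∈ rows, r ≠ [] := by
        intro r hr he
        have := h2 r hr
        simp [he] at this
      rw [pyZipStar_step rows h1 hne, List.zip_cons_cons, zipCols]
      congr 1
      refine ih (rows.map List.tail) (by simpa using h1) ?_
      intro r hr
      obtain ⟨r0, hr0, rfl⟩ := List.mem_map.mp hr
      have := h2 r0 hr0
      simp only [List.length_cons] at this
      have : r0.tail.length = r0.length - 1 := List.length_tail
      omega

theorem row7 (r : List String) (h : 7 ≤ r.length) :
    ∃ a0 a1 a2 a3 a4 a5 a6 t, r = a0 :: a1 :: a2 :: a3 :: a4 :: a5 :: a6 :: t := by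
  rcases r with _ | ⟨a0, _ | ⟨a1, _ | ⟨a2, _ | ⟨a3, _ | ⟨a4, _ | ⟨a5, _ | ⟨a6, t⟩⟩⟩⟩⟩⟩⟩ <;>
    simp at h ⊢

theorem zipCols_keys7 (rows : List (List String)) (h : ∀ r ∈ rows, 7 ≤ r.length) :
    zipCols keys7 rows = pairsCols rows := by
  simp only [keys7, zipCols, pairsCols, List.map_map, List.cons.injEq, and_true,
    Prod.mk.injEq, true_and]
  refine ⟨?_, ?_, ?_, ?_, ?_, ?_, ?_⟩ <;>
  · apply List.map_congr_left
    intro r hr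
    obtain ⟨a0, a1, a2, a3, a4, a5, a6, t, rfl⟩ := row7 r (h r hr)
    simp only [PySem.List.pyGet?, PySem.List.pyIdx?, List.length_cons]
    rw [if_pos (by omega), if_pos (by omega)]
    simp

-- canonical form of B's result
theorem B_canon (rows : List (List String)) (d : List (String × List String))
    (h : (d.map Prod.fst).Nodup) (hlen : ∀ r ∈ rows, 7 ≤ r.length) :
    review_append_alt d rows = d.map (multiExtend (pairsCols rows)) := by
  cases hrows : rows with
  | nil =>
      rw [review_append_alt]
      simp only [pyZipStar_nil, List.zip_nil_right, List.foldl_nil]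
      rw [List.map_congr_left (g := id) (fun p _ => multiExtend_pairsCols_nil p), List.map_id]
  | cons r rs =>
      rw [← hrows, review_append_alt,
          zip_pyZipStar keys7 rows (by rw [hrows]; exact List.cons_ne_nil _ _)
            (fun r hr => by simpa [keys7] using hlen r hr),
          zipCols_keys7 rows hlen]
      exact foldl_extendAt_eq_map (pairsCols rows) d h

-- ===== VERDICT (by name: the statements are the Claim_ definitions above) =====
theorem review_append_spec : Claim_equal_review_append := by
  intro d rows _ hpre
  unfold Spec_review_append
  rcases hpre with h | ⟨hnd, -, hlen⟩
  · subst h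
    rw [review_append_alt]
    simp [review_append, keys7, pyZipStar_nil]
  · rw [A_canon rows d hnd, B_canon rows d hnd hlen]
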